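-- pv_equiv track=rewrite | github.com/kaya53/daily-algorithm | IN-PROGRESS/B5430_AC/B5430_AC.py | solution
-- ===== SOURCE A (Python) =====
-- def solution(func, nums):
--     leng = len(func)
--     pIdx = 0
--     for i in range(leng):
--         if func[i] == 'R':
--             if not pIdx: pIdx = -1
--             else: pIdx = 0
--             continue
--         if nums:
--             nums.pop(pIdx)
--         else:
--             return 'error'
--     if pIdx == -1:
--         return '['+ ','.join(map(str, nums[::-1])) + ']'
--     return '['+ ','.join(map(str, nums)) + ']'
-- ===== SOURCE B (Python) =====
-- def solution(func, nums):
--     lo, hi = 0, len(nums)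
--     rev = False
--     for c in func:
--         if c == 'R':
--             rev = not rev
--         elif lo == hi:
--             return 'error'
--         elif rev:
--             hi -= 1
--         else:
--             lo += 1
--     part = nums[lo:hi]
--     if rev:
--         part.reverse()
--     return '[' + ','.join(map(str, part)) + ']'
-- ===== Notes on version B (the rewrite author's own statement) =====
-- stated objective: faster
-- what changed: B never mutates or scans the list per operation: it keeps two index bounds and a reversal flag, each operation is O(1) bookkeeping, and the answer is one final slice (A pops from the front of a Python list, an O(n) shift each time).
import Mathlib
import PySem

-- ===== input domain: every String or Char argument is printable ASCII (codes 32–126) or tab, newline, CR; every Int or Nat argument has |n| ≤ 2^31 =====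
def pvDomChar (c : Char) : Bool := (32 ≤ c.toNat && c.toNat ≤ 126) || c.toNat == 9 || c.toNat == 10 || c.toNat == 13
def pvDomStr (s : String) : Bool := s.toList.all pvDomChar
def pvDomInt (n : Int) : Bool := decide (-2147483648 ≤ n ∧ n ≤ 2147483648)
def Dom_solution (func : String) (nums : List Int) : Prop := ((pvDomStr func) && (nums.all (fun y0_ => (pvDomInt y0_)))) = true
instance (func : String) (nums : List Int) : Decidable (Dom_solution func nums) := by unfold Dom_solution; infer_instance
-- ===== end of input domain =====

-- B replaces A's per-operation list pops by two index bounds and a reversal flag with one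
-- final slice (faster, asymptotic in a timing run). Equivalence is about the RETURN
-- value only: Python A pops from its nums argument in place, B leaves it untouched.

-- ===== PORT A =====
-- A's loop: pIdx toggles between 0 and -1 on 'R'; any other char pops nums at pIdx
-- (front or back); empty nums means early return 'error' (modelled as none).
def solALoop : List Char → Int → List Int → Option (Int × List Int)
  | [], p, ns => some (p, ns)
  | c :: cs, p, ns =>
    if c = 'R' then solALoop cs (if p = 0 then -1 else 0) ns
    else
      match ns with
      | [] => none
      | x :: xs => solALoop cs p (if p = 0 then xs else (x :: xs).dropLast)

def solution (func : String) (nums : List Int) : String :=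
  match solALoop func.toList 0 nums with
  | none => "error"
  | some (p, ns) =>
    if p = -1 then "[" ++ PySem.Str.join "," (ns.reverse.map PySem.Int.toStr) ++ "]"
    else "[" ++ PySem.Str.join "," (ns.map PySem.Int.toStr) ++ "]"

-- ===== PORT B =====
-- B's loop: O(1) bookkeeping per char — bounds lo/hi into the untouched list, flag rev.
def solBLoop : List Char → Nat → Nat → Bool → Option (Nat × Nat × Bool)
  | [], lo, hi, rev => some (lo, hi, rev)
  | c :: cs, lo, hi, rev =>
    if c = 'R' then solBLoop cs lo hi (!rev)
    else if lo = hi then none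
    else if rev then solBLoop cs lo (hi - 1) rev
    else solBLoop cs (lo + 1) hi rev

def solution_alt (func : String) (nums : List Int) : String :=
  match solBLoop func.toList 0 nums.length false with
  | none => "error"
  | some (lo, hi, rev) =>
    let part := (nums.drop lo).take (hi - lo)
    let part := if rev then part.reverse else part
    "[" ++ PySem.Str.join "," (part.map PySem.Int.toStr) ++ "]"

-- ===== PRECONDITION & SPEC =====
def Spec_solution (func : String) (nums : List Int) (out : String) : Prop := out = solution_alt func nums
instance (func : String) (nums : List Int) (out : String) : Decidable (Spec_solution func nums out) := by unfold Spec_solution; infer_instance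

-- ===== CLAIM (what is proved, stated in full; the proofs are below) =====
def Claim_equal_solution : Prop := ∀ (func : String) (nums : List Int), Dom_solution func nums → Spec_solution func nums (solution func nums)

-- ===== LEMMAS AND PROOFS =====

-- Invariant: A's state (pIdx, current list) is determined by B's (lo, hi, rev) and the original list.
theorem solLoop_agree (cs : List Char) (nums : List Int) :
    ∀ (lo hi : Nat) (rev : Bool), lo ≤ hi → hi ≤ nums.length →
    solALoop cs (if rev then -1 else 0) ((nums.drop lo).take (hi - lo)) =
      (solBLoop cs lo hi rev).map
        (fun s => ((if s.2.2 then -1 else 0), (nums.drop s.1).take (s.2.1 - s.1))) := by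
  induction cs with
  | nil => intro lo hi rev _ _; simp [solALoop, solBLoop]
  | cons c cs ih =>
    intro lo hi rev hlh hhn
    by_cases hR : c = 'R'
    · cases rev with
      | false => simpa [solALoop, solBLoop, hR] using ih lo hi true hlh hhn
      | true => simpa [solALoop, solBLoop, hR] using ih lo hi false hlh hhn
    · have hlen : ((nums.drop lo).take (hi - lo)).length = hi - lo := by
        simp; omega
      by_cases heq : lo = hi
      · have : (nums.drop lo).take (hi - lo) = [] := by
          subst heq; simp
        subst heq
        simp [solALoop, solBLoop, hR]
      · have hlt : lo < hi := lt_of_le_of_ne hlh heq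
        have hne : (nums.drop lo).take (hi - lo) ≠ [] := by
          intro h; rw [h] at hlen; simp at hlen; omega
        obtain ⟨x, xs, hx⟩ := List.exists_cons_of_ne_nil hne
        cases rev with
        | false =>
          have htail : xs = (nums.drop (lo+1)).take (hi - (lo+1)) := by
            have h2 : ((nums.drop lo).take (hi - lo)).tail = (nums.drop (lo+1)).take (hi - (lo+1)) := by
              rw [← List.drop_one, List.drop_take, List.drop_drop]
              have h3 : hi - lo - 1 = hi - (lo + 1) := by omega
              rw [h3]
            rw [hx] at h2; simpa using h2
          simp [solALoop, solBLoop, hR, hx, heq, htail]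
          simpa using ih (lo+1) hi false (by omega) hhn
        | true =>
          have hdl : (x :: xs).dropLast = (nums.drop lo).take (hi - 1 - lo) := by
            rw [← hx, List.dropLast_eq_take, hlen, List.take_take]
            congr 1; omega
          simp [solALoop, solBLoop, hR, hx, heq, hdl]
          simpa using ih lo (hi - 1) true (by omega) (by omega)

-- ===== VERDICT (by name: the statement is the Claim_ definition above) =====
theorem solution_spec : Claim_equal_solution := by
  intro func nums _
  unfold Spec_solution solution solution_alt
  have h := solLoop_agree func.toList nums 0 nums.length false (Nat.zero_le _) (le_refl _)
  simp at h
  rw [h]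
  cases hb : solBLoop func.toList 0 nums.length false with
  | none => simp
  | some s =>
    obtain ⟨lo, hi, rev⟩ := s
    cases rev <;> simp
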